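-- pv_equiv track=rewrite | github.com/khadijatarhri/Automatic-detection-of-senstve-data-recommendation-engine-for-metadata-govnance | recommendation_engine/views.py | _get_ranger_policy
-- ===== SOURCE A (Python) =====
-- def _get_ranger_policy(detected_entities):
--     if 'PERSON' in detected_entities:
--         return "ranger_masking_policy_person"
--     elif 'ID_MAROC' in detected_entities:
--         return "ranger_hashing_policy_id"
--     elif any(entity in detected_entities for entity in ['PHONE_NUMBER', 'EMAIL_ADDRESS']):
--         return "ranger_partial_masking_policy_phone"
--     elif any(entity in detected_entities for entity in ['IBAN_CODE', 'CREDIT_CARD']):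
--         return "ranger_encryption_policy_financial"
--     else:
--         return "ranger_masking_policy_person"
-- ===== SOURCE B (Python) =====
-- def _get_ranger_policy(detected_entities):
--     prio = {'PERSON': 0, 'ID_MAROC': 1,
--             'PHONE_NUMBER': 2, 'EMAIL_ADDRESS': 2,
--             'IBAN_CODE': 3, 'CREDIT_CARD': 3}
--     policies = ["ranger_masking_policy_person",
--                 "ranger_hashing_policy_id",
--                 "ranger_partial_masking_policy_phone",
--                 "ranger_encryption_policy_financial",
--                 "ranger_masking_policy_person"]
--     best = 4
--     for e in detected_entities:
--         best = min(best, prio.get(e, 4))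
--     return policies[best]
-- ===== Notes on version B (the rewrite author's own statement) =====
-- stated objective: alternative
-- what changed: Replaced the if/elif chain of four membership tests over the list by a single fold over the input that tracks the minimal entity priority from a dict and indexes a policy table with it.
import Mathlib
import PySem

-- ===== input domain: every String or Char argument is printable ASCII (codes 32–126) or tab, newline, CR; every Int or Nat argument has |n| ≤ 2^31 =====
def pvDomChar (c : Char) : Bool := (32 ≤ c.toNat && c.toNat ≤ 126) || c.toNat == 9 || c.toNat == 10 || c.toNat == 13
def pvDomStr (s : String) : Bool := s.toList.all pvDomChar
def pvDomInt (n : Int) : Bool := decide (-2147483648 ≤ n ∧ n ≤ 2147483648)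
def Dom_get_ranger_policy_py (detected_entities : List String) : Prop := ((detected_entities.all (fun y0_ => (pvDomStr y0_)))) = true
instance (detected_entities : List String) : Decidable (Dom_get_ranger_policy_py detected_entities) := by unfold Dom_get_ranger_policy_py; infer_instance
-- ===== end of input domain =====

set_option maxRecDepth 4000

-- B replaces A's if/elif membership chain by a single pass over the input that keeps the
-- minimal entity priority and indexes a policy table with it (objective: alternative one-pass traversal).

-- ===== PORT A =====
def get_ranger_policy_py (detected_entities : List String) : String :=
  if detected_entities.contains "PERSON" then
    "ranger_masking_policy_person"
  else if detected_entities.contains "ID_MAROC" then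
    "ranger_hashing_policy_id"
  else if (["PHONE_NUMBER", "EMAIL_ADDRESS"].any fun entity => detected_entities.contains entity) then
    "ranger_partial_masking_policy_phone"
  else if (["IBAN_CODE", "CREDIT_CARD"].any fun entity => detected_entities.contains entity) then
    "ranger_encryption_policy_financial"
  else
    "ranger_masking_policy_person"

-- ===== PORT B =====
def pvPrio : PySem.Dict String Int :=
  PySem.Dict.ofList [("PERSON", 0), ("ID_MAROC", 1),
                     ("PHONE_NUMBER", 2), ("EMAIL_ADDRESS", 2),
                     ("IBAN_CODE", 3), ("CREDIT_CARD", 3)]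

def pvPolicies : List String :=
  ["ranger_masking_policy_person",
   "ranger_hashing_policy_id",
   "ranger_partial_masking_policy_phone",
   "ranger_encryption_policy_financial",
   "ranger_masking_policy_person"]

def get_ranger_policy_py_alt (detected_entities : List String) : String :=
  let best := detected_entities.foldl (fun b e => min b (pvPrio.getD e 4)) 4
  PySem.List.pyGetD pvPolicies best ""

-- ===== PRECONDITION & SPEC =====
def Spec_get_ranger_policy_py (detected_entities : List String) (out : String) : Prop := out = get_ranger_policy_py_alt detected_entities
instance (detected_entities : List String) (out : String) : Decidable (Spec_get_ranger_policy_py detected_entities out) := by unfold Spec_get_ranger_policy_py; infer_instance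

-- ===== CLAIM (what is proved, stated in full; the proofs are below) =====
def Claim_equal_get_ranger_policy_py : Prop := ∀ (detected_entities : List String), Dom_get_ranger_policy_py detected_entities → Spec_get_ranger_policy_py detected_entities (get_ranger_policy_py detected_entities)

-- ===== LEMMAS AND PROOFS =====

theorem pvPrio_getD (e : String) :
    pvPrio.getD e 4 =
      if e = "PERSON" then 0 else if e = "ID_MAROC" then 1
      else if e = "PHONE_NUMBER" ∨ e = "EMAIL_ADDRESS" then 2
      else if e = "IBAN_CODE" ∨ e = "CREDIT_CARD" then 3 else 4 := by
  have hmk : pvPrio = PySem.Dict.mk [("PERSON", 0), ("ID_MAROC", 1),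
      ("PHONE_NUMBER", 2), ("EMAIL_ADDRESS", 2), ("IBAN_CODE", 3), ("CREDIT_CARD", 3)] := by decide
  rw [hmk]
  simp only [PySem.Dict.getD, PySem.Dict.get?_mk_cons, beq_iff_eq]
  by_cases h1 : e = "PERSON" <;> by_cases h2 : e = "ID_MAROC" <;>
    by_cases h3 : e = "PHONE_NUMBER" <;> by_cases h4 : e = "EMAIL_ADDRESS" <;>
    by_cases h5 : e = "IBAN_CODE" <;> by_cases h6 : e = "CREDIT_CARD" <;>
    simp_all [PySem.Dict.get?, eq_comm]

theorem pv_fold_le_acc (xs : List String) (a : Int) :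
    xs.foldl (fun b e => min b (pvPrio.getD e 4)) a ≤ a := by
  induction xs generalizing a with
  | nil => simp
  | cons x xs ih =>
    simp only [List.foldl_cons]
    exact le_trans (ih _) (min_le_left _ _)

theorem pv_fold_le_of_mem {e : String} {xs : List String} (a : Int) (h : e ∈ xs) :
    xs.foldl (fun b e => min b (pvPrio.getD e 4)) a ≤ pvPrio.getD e 4 := by
  induction xs generalizing a with
  | nil => cases h
  | cons x xs ih =>
    rcases List.mem_cons.mp h with rfl | h
    · simp only [List.foldl_cons]
      exact le_trans (pv_fold_le_acc _ _) (min_le_right _ _)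
    · exact ih _ h

theorem pv_le_fold {k : Int} {xs : List String} (a : Int) (ha : k ≤ a)
    (h : ∀ e ∈ xs, k ≤ pvPrio.getD e 4) :
    k ≤ xs.foldl (fun b e => min b (pvPrio.getD e 4)) a := by
  induction xs generalizing a with
  | nil => simpa using ha
  | cons x xs ih =>
    simp only [List.foldl_cons]
    exact ih _ (le_min ha (h x (by simp))) (fun e he => h e (by simp [he]))

theorem get_ranger_policy_py_spec : Claim_equal_get_ranger_policy_py := by
  unfold Claim_equal_get_ranger_policy_py
  intro xs _
  unfold Spec_get_ranger_policy_py get_ranger_policy_py get_ranger_policy_py_alt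
  simp only [List.contains_iff_mem, List.any_cons, List.any_nil, Bool.or_false,
    Bool.or_eq_true]
  by_cases hP : "PERSON" ∈ xs
  · have h1 : xs.foldl (fun b e => min b (pvPrio.getD e 4)) 4 ≤ 0 := by
      have := pv_fold_le_of_mem (e := "PERSON") 4 hP; rwa [pvPrio_getD] at this
    have h2 : (0 : Int) ≤ xs.foldl (fun b e => min b (pvPrio.getD e 4)) 4 := by
      refine pv_le_fold 4 (by norm_num) (fun e _ => ?_)
      rw [pvPrio_getD]; split_ifs <;> norm_num
    have heq : xs.foldl (fun b e => min b (pvPrio.getD e 4)) 4 = 0 := le_antisymm h1 h2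
    simp only [hP, if_pos, heq]
    rfl
  · by_cases hI : "ID_MAROC" ∈ xs
    · have h1 : xs.foldl (fun b e => min b (pvPrio.getD e 4)) 4 ≤ 1 := by
        have := pv_fold_le_of_mem (e := "ID_MAROC") 4 hI; rwa [pvPrio_getD] at this
      have h2 : (1 : Int) ≤ xs.foldl (fun b e => min b (pvPrio.getD e 4)) 4 := by
        refine pv_le_fold 4 (by norm_num) (fun e he => ?_)
        rw [pvPrio_getD]
        split_ifs with g1 <;> try norm_num
        subst g1; exact absurd he hP
      have heq : xs.foldl (fun b e => min b (pvPrio.getD e 4)) 4 = 1 := le_antisymm h1 h2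
      simp only [hP, hI, if_neg, if_pos, not_false_iff, heq]
      rfl
    · by_cases h2g : "PHONE_NUMBER" ∈ xs ∨ "EMAIL_ADDRESS" ∈ xs
      · have h1 : xs.foldl (fun b e => min b (pvPrio.getD e 4)) 4 ≤ 2 := by
          rcases h2g with h | h
          · have := pv_fold_le_of_mem (e := "PHONE_NUMBER") 4 h; rw [pvPrio_getD] at this
            simpa using this
          · have := pv_fold_le_of_mem (e := "EMAIL_ADDRESS") 4 h; rw [pvPrio_getD] at this
            simpa using this
        have h2 : (2 : Int) ≤ xs.foldl (fun b e => min b (pvPrio.getD e 4)) 4 := by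
          refine pv_le_fold 4 (by norm_num) (fun e he => ?_)
          rw [pvPrio_getD]
          split_ifs with g1 g2 <;> try norm_num
          · subst g1; exact absurd he hP
          · subst g2; exact absurd he hI
        have heq : xs.foldl (fun b e => min b (pvPrio.getD e 4)) 4 = 2 := le_antisymm h1 h2
        simp only [hP, hI, h2g, if_neg, if_pos, not_false_iff, heq]
        rfl
      · by_cases h3g : "IBAN_CODE" ∈ xs ∨ "CREDIT_CARD" ∈ xs
        · rw [not_or] at h2g
          have h1 : xs.foldl (fun b e => min b (pvPrio.getD e 4)) 4 ≤ 3 := by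
            rcases h3g with h | h
            · have := pv_fold_le_of_mem (e := "IBAN_CODE") 4 h; rw [pvPrio_getD] at this
              simpa using this
            · have := pv_fold_le_of_mem (e := "CREDIT_CARD") 4 h; rw [pvPrio_getD] at this
              simpa using this
          have h2 : (3 : Int) ≤ xs.foldl (fun b e => min b (pvPrio.getD e 4)) 4 := by
            refine pv_le_fold 4 (by norm_num) (fun e he => ?_)
            rw [pvPrio_getD]
            split_ifs with g1 g2 g3 <;> try norm_num
            · subst g1; exact absurd he hP
            · subst g2; exact absurd he hI
            · rcases g3 with rfl | rfl
              · exact absurd he h2g.1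
              · exact absurd he h2g.2
          have heq : xs.foldl (fun b e => min b (pvPrio.getD e 4)) 4 = 3 := le_antisymm h1 h2
          simp only [hP, hI, h2g.1, h2g.2, h3g, if_neg, if_pos, not_false_iff, or_self, heq]
          rfl
        · rw [not_or] at h2g; rw [not_or] at h3g
          have h2 : (4 : Int) ≤ xs.foldl (fun b e => min b (pvPrio.getD e 4)) 4 := by
            refine pv_le_fold 4 (by norm_num) (fun e he => ?_)
            rw [pvPrio_getD]
            split_ifs with g1 g2 g3 g4 <;> try norm_num
            · subst g1; exact absurd he hP
            · subst g2; exact absurd he hI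
            · rcases g3 with rfl | rfl
              · exact absurd he h2g.1
              · exact absurd he h2g.2
            · rcases g4 with rfl | rfl
              · exact absurd he h3g.1
              · exact absurd he h3g.2
          have heq : xs.foldl (fun b e => min b (pvPrio.getD e 4)) 4 = 4 :=
            le_antisymm (pv_fold_le_acc xs 4) h2
          simp only [hP, hI, h2g.1, h2g.2, h3g.1, h3g.2, if_neg, not_false_iff, or_self, heq]
          rfl
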